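-- pv_equiv track=rewrite | github.com/Lens-Academy/lens-platform | core/agents/dispatcher.py | _build_reply_text
-- ===== SOURCE A (Python) =====
-- AGENT_DISPLAY_NAMES: dict[str, str] = {
--     "coach": "Coach",
--     "tutor": "Tutor",
-- }
--
-- def _build_reply_text(parts: list[tuple[str, str]]) -> str:
--     """Join reply parts, prefixing with agent name and inserting separators on change."""
--     sections = []
--     prev_agent = None
--     for agent_name, text in parts:
--         if prev_agent is not None and agent_name != prev_agent:
--             display = AGENT_DISPLAY_NAMES.get(agent_name, agent_name)
--             sections.append(f"--- *{display}* ---")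
--         sections.append(text)
--         prev_agent = agent_name
--
--     reply = "\n\n".join(sections)
--
--     # Prefix with agent name from the first part
--     if parts:
--         first_agent = parts[0][0]
--         display = AGENT_DISPLAY_NAMES.get(first_agent, first_agent)
--         reply = f"**{display}:**\n{reply}"
--
--     return reply
-- ===== SOURCE B (Python) =====
-- AGENT_DISPLAY_NAMES: dict[str, str] = {
--     "coach": "Coach",
--     "tutor": "Tutor",
-- }
--
-- def _build_reply_text(parts: list[tuple[str, str]]) -> str:
--     """Group parts into consecutive runs per agent, then render runs in one pass."""
--     if not parts:
--         return ""
--     # Phase 1: collapse into runs of the same agent.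
--     groups: list[tuple[str, list[str]]] = []
--     for agent, text in parts:
--         if groups and groups[-1][0] == agent:
--             groups[-1][1].append(text)
--         else:
--             groups.append((agent, [text]))
--     # Phase 2: render -- first run has no separator, later runs are preceded by one.
--     def disp(a: str) -> str:
--         return AGENT_DISPLAY_NAMES.get(a, a)
--     (first_agent, first_texts) = groups[0]
--     pieces = list(first_texts)
--     for agent, texts in groups[1:]:
--         pieces.append(f"--- *{disp(agent)}* ---")
--         pieces.extend(texts)
--     return f"**{disp(first_agent)}:**\n" + "\n\n".join(pieces)
-- ===== Notes on version B (the rewrite author's own statement) =====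
-- stated objective: alternative
-- what changed: Replaced A's single pass carrying a prev_agent flag by a two-phase decomposition: first collapse parts into consecutive runs per agent, then render the first run's texts and each later run behind its separator, joining once at the end.
import Mathlib
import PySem

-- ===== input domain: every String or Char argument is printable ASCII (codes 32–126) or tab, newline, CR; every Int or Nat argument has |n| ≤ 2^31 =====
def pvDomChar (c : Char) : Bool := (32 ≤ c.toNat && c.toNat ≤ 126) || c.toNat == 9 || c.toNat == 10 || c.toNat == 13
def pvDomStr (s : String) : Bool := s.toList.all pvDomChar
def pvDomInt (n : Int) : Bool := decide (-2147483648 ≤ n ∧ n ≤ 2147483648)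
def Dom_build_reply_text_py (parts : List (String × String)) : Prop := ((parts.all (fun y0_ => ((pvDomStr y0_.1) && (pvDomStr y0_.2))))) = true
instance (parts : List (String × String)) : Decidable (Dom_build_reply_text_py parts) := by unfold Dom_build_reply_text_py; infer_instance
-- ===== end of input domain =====

-- B replaces A's single pass with a prev-agent flag by a group-then-render decomposition
-- (collapse parts into runs per agent, then emit each later run behind its separator); objective: alternative.

-- AGENT_DISPLAY_NAMES.get(a, a), shared module-level constant of both Pythons
def agentDisplay (a : String) : String :=
  PySem.Dict.getD (PySem.Dict.ofList [("coach", "Coach"), ("tutor", "Tutor")]) a a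

-- ===== PORT A =====
-- the body of A's 'for agent_name, text in parts' loop
def stepA (st : List String × Option String) (p : String × String) : List String × Option String :=
  let sections :=
    match st.2 with
    | none => st.1
    | some pa => if p.1 ≠ pa then st.1 ++ ["--- *" ++ agentDisplay p.1 ++ "* ---"] else st.1
  (sections ++ [p.2], some p.1)

def build_reply_text_py (parts : List (String × String)) : String :=
  let st := parts.foldl stepA ([], none)
  let reply := PySem.Str.join "\n\n" st.1
  match parts with
  | [] => reply
  | (fa, _) :: _ => "**" ++ agentDisplay fa ++ ":**\n" ++ reply

-- ===== PORT B =====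
-- phase 1 of Source B: the body of the run-collapsing loop ('groups[-1][1].append' / 'groups.append')
def stepB (gs : List (String × List String)) (p : String × String) : List (String × List String) :=
  match gs.getLast? with
  | some g => if g.1 == p.1 then gs.dropLast ++ [(g.1, g.2 ++ [p.2])] else gs ++ [(p.1, [p.2])]
  | none => gs ++ [(p.1, [p.2])]

def groupRuns (parts : List (String × String)) : List (String × List String) :=
  parts.foldl stepB []

def build_reply_text_py_alt (parts : List (String × String)) : String :=
  if parts = [] then ""
  else
    match groupRuns parts with
    | [] => ""  -- unreachable: parts ≠ []
    | (firstAgent, firstTexts) :: rest =>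
      let pieces := rest.foldl
        (fun (acc : List String) g => acc ++ ["--- *" ++ agentDisplay g.1 ++ "* ---"] ++ g.2)
        firstTexts
      "**" ++ agentDisplay firstAgent ++ ":**\n" ++ PySem.Str.join "\n\n" pieces

-- ===== PRECONDITION & SPEC =====
def Spec_build_reply_text_py (parts : List (String × String)) (out : String) : Prop := out = build_reply_text_py_alt parts
instance (parts : List (String × String)) (out : String) : Decidable (Spec_build_reply_text_py parts out) := by unfold Spec_build_reply_text_py; infer_instance

-- ===== CLAIM (what is proved, stated in full; the proofs are below) =====
def Claim_equal_build_reply_text_py : Prop := ∀ (parts : List (String × String)), Dom_build_reply_text_py parts → Spec_build_reply_text_py parts (build_reply_text_py parts)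

-- ===== LEMMAS AND PROOFS =====

-- the list of sections A emits after having already seen an item of agent `prev`
def sectionsFrom (prev : String) : List (String × String) → List String
  | [] => []
  | (a, t) :: l =>
      (if a ≠ prev then ["--- *" ++ agentDisplay a ++ "* ---"] else []) ++ t :: sectionsFrom a l

-- every group rendered behind its separator (including the first)
def renderTail (gs : List (String × List String)) : List String :=
  gs.flatMap (fun g => ("--- *" ++ agentDisplay g.1 ++ "* ---") :: g.2)

theorem stepA_some (secs : List String) (a : String) (p : String × String) :
    stepA (secs, some a) p =
      ((if p.1 ≠ a then secs ++ ["--- *" ++ agentDisplay p.1 ++ "* ---"] else secs) ++ [p.2],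
        some p.1) := rfl

-- A's fold, started after a first item of agent `a`, appends exactly sectionsFrom a l
theorem foldA_sections (l : List (String × String)) :
    ∀ (secs : List String) (a : String),
      (l.foldl stepA (secs, some a)).1 = secs ++ sectionsFrom a l := by
  induction l with
  | nil => intro secs a; simp [sectionsFrom]
  | cons p l ih =>
    obtain ⟨a', t⟩ := p
    intro secs a
    rw [List.foldl_cons, stepA_some]
    by_cases h : a' ≠ a
    · rw [if_pos h, ih]
      simp [sectionsFrom, h]
    · rw [if_neg h, ih]
      simp [sectionsFrom, h]

-- B's grouping fold, started from a non-empty group list whose last run has agent `a`,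
-- appends exactly sectionsFrom a l to the rendering
theorem foldB_sections (l : List (String × String)) :
    ∀ (gs : List (String × List String)) (a : String) (ts : List String),
      gs.getLast? = some (a, ts) →
      renderTail (l.foldl stepB gs) = renderTail gs ++ sectionsFrom a l := by
  induction l with
  | nil => intro gs a ts _; simp [sectionsFrom]
  | cons p l ih =>
    obtain ⟨a', t⟩ := p
    intro gs a ts hlast
    have hgs : gs = gs.dropLast ++ [(a, ts)] := by
      have hne : gs ≠ [] := by intro h; simp [h] at hlast
      have hdg := List.dropLast_append_getLast hne
      rw [List.getLast?_eq_some_getLast hne] at hlast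
      simp only [Option.some.injEq] at hlast
      rw [hlast] at hdg; exact hdg.symm
    rw [List.foldl_cons]
    by_cases h : a' = a
    · have hstep : stepB gs (a', t) = gs.dropLast ++ [(a, ts ++ [t])] := by
        unfold stepB; rw [hlast]; simp [h]
      rw [hstep, ih _ a (ts ++ [t]) (by simp)]
      conv_rhs => rw [hgs]
      simp [renderTail, sectionsFrom, h]
    · have hstep : stepB gs (a', t) = gs ++ [(a', [t])] := by
        unfold stepB; rw [hlast]; simp [Ne.symm h]
      rw [hstep, ih _ a' [t] (by simp)]
      simp [renderTail, sectionsFrom, h]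

-- the grouping fold never changes the agent of the first group
theorem foldB_head (l : List (String × String)) :
    ∀ (g0 : String × List String) (gs' : List (String × List String)),
      ∃ ts' gs'', (l.foldl stepB (g0 :: gs')) = (g0.1, ts') :: gs'' := by
  induction l with
  | nil => intro g0 gs'; exact ⟨g0.2, gs', by simp⟩
  | cons p l ih =>
    intro g0 gs'
    rw [List.foldl_cons]
    cases gs' with
    | nil =>
      by_cases h : g0.1 == p.1
      · have hstep : stepB [g0] p = [(g0.1, g0.2 ++ [p.2])] := by
          unfold stepB; simp [h]
        rw [hstep]; exact ih (g0.1, g0.2 ++ [p.2]) []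
      · have hstep : stepB [g0] p = [g0, (p.1, [p.2])] := by
          unfold stepB; simp [h]
        rw [hstep]; exact ih g0 [(p.1, [p.2])]
    | cons y ys =>
      have hlast : (g0 :: y :: ys).getLast? = some ((y :: ys).getLast (by simp)) := by
        rw [List.getLast?_eq_some_getLast (by simp)]
        simp [List.getLast_cons]
      by_cases h : ((y :: ys).getLast (by simp)).1 == p.1
      · have hstep : stepB (g0 :: y :: ys) p =
            g0 :: ((y :: ys).dropLast ++
              [(((y :: ys).getLast (by simp)).1, ((y :: ys).getLast (by simp)).2 ++ [p.2])]) := by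
          unfold stepB; rw [hlast]; simp [h, List.dropLast_cons_of_ne_nil]
        rw [hstep]; exact ih g0 _
      · have hstep : stepB (g0 :: y :: ys) p = g0 :: (y :: ys ++ [(p.1, [p.2])]) := by
          unfold stepB; rw [hlast]; simp [h]
        rw [hstep]; exact ih g0 _

theorem join_congr (s : String) {xs ys : List String} (h : xs = ys) :
    PySem.Str.join s xs = PySem.Str.join s ys := by rw [h]

-- ===== VERDICT (by name: the statement is the Claim_ definition above) =====
theorem build_reply_text_py_spec : Claim_equal_build_reply_text_py := by
  intro parts _
  unfold Spec_build_reply_text_py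
  cases parts with
  | nil => simp [build_reply_text_py, build_reply_text_py_alt, PySem.Str.join, PySem.Chars.join, List.intercalate]
  | cons p l =>
    obtain ⟨a, t⟩ := p
    have hA : (((a, t) :: l).foldl stepA ([], none)).1 = t :: sectionsFrom a l := by
      rw [List.foldl_cons]
      have hstep : stepA ([], none) (a, t) = ([t], some a) := rfl
      rw [hstep]
      simpa using foldA_sections l [t] a
    obtain ⟨ts', gs'', hB⟩ := foldB_head l (a, [t]) []
    have hgr : groupRuns ((a, t) :: l) = (a, ts') :: gs'' := by
      unfold groupRuns
      rw [List.foldl_cons]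
      have hstep : stepB [] (a, t) = [(a, [t])] := rfl
      rw [hstep]
      exact hB
    have hrt : renderTail ((a, ts') :: gs'') = renderTail [(a, [t])] ++ sectionsFrom a l := by
      rw [← hB]
      exact foldB_sections l [(a, [t])] a [t] (by simp)
    have hpieces : ts' ++ renderTail gs'' = t :: sectionsFrom a l := by
      simp only [renderTail, List.flatMap_cons, List.flatMap_nil, List.cons_append,
        List.nil_append, List.append_nil, List.cons.injEq] at hrt
      exact hrt.2
    show build_reply_text_py ((a, t) :: l) = build_reply_text_py_alt ((a, t) :: l)
    unfold build_reply_text_py build_reply_text_py_alt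
    rw [hgr]
    simp only [hA, if_neg (by simp : ¬((a, t) :: l = []))]
    congr 1
    apply join_congr
    rw [← hpieces]
    rw [show (fun (acc : List String) (g : String × List String) =>
          acc ++ ["--- *" ++ agentDisplay g.1 ++ "* ---"] ++ g.2) =
        (fun acc g => acc ++ (("--- *" ++ agentDisplay g.1 ++ "* ---") :: g.2)) by
      funext acc g; simp]
    rw [PySem.List.foldl_append_eq_flatMap]
    rfl
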